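-- pv_equiv track=rewrite | github.com/MrBrantCode/unitest_baseline | mut_generate/mist_train_taco/taco_14712/solution.py | calculate_matsuzaki_value
-- ===== SOURCE A (Python) =====
-- def calculate_matsuzaki_value(N, P):
--     def eratosthenes(n):
--         prime_table = [False, False, True] + [False if i % 2 != 0 else True for i in range(n - 2)]
--         i = 3
--         pn = [2]
--         while i * i <= n:
--             if prime_table[i]:
--                 j = i * i
--                 pn.append(i)
--                 while j <= n:
--                     prime_table[j] = False
--                     j += i
--             i += 2
--         for j in range(i, n + 1):
--             if prime_table[j]:
--                 pn.append(j)
--         return pn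
--
--     prime_numbers = eratosthenes(200000)
--
--     i = 0
--     while prime_numbers[i] <= N:
--         i += 1
--
--     d = []
--     for j in range(i, i + 30):
--         for k in range(j, i + 30):
--             d.append(prime_numbers[j] + prime_numbers[k])
--
--     d.sort()
--
--     return d[P - 1]
-- ===== SOURCE B (Python) =====
-- def calculate_matsuzaki_value(N, P):
--     # primes up to 200000 by incremental trial division over odd candidates
--     primes = [2]
--     c = 3
--     while c <= 200000:
--         d = 3
--         is_p = True
--         while d * d <= c:
--             if c % d == 0:
--                 is_p = False
--                 break
--             d += 2
--         if is_p:
--             primes.append(c)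
--         c += 2
--
--     # index of the first prime exceeding N = number of primes <= N
--     i = sum(1 for p in primes if p <= N)
--
--     # pairwise sums (with repetition) of the 30-prime window, by suffix recursion
--     w = primes[i:i + 30]
--     sums = []
--     t = w
--     while t:
--         x = t[0]
--         for y in t:
--             sums.append(x + y)
--         t = t[1:]
--
--     sums.sort()
--     return sums[P - 1]
-- ===== Notes on version B (the rewrite author's own statement) =====
-- stated objective: alternative
-- what changed: Prime generation is rewritten from an in-place Sieve of Eratosthenes over a boolean table to incremental trial division by odd candidate divisors, the index-scan for the first prime above N becomes a count of primes <= N, and the index-based double loop over the 30-prime window becomes a structural suffix recursion building the pairwise sums.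
import Mathlib
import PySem

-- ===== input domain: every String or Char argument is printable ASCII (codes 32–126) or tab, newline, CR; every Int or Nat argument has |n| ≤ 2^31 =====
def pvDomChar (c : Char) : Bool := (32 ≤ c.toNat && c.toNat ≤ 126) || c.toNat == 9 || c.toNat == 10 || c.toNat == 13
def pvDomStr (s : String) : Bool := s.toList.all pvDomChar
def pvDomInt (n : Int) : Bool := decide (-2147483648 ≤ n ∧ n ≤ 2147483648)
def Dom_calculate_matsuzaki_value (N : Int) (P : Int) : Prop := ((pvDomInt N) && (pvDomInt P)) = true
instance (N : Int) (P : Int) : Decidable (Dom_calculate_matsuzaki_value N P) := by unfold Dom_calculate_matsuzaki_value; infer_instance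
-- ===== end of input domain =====

-- B replaces the Sieve of Eratosthenes by trial division over odd candidates, the index
-- scan for the first prime above N by a count of the primes ≤ N, and the index-based
-- double loop over the 30-prime window by a suffix recursion (objective: alternative).

-- ===== PORT A =====
-- prime_table = [False, False, True] + [False if i % 2 != 0 else True for i in range(n - 2)]
-- (the table is kept as an Array Bool so evaluation is feasible; entries are A's)
def pvTable0 (n : Nat) : Array Bool :=
  ([false, false, true] ++ (List.range (n - 2)).map (fun i => i % 2 == 0)).toArray

-- 'j = i * i; while j <= n: prime_table[j] = False; j += i' — the visited j are exactly
-- the arithmetic progression i*i, i*i+i, …, ≤ n (called only when i*i ≤ n)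
def pvClear (n i : Nat) (tbl : Array Bool) : Array Bool :=
  (List.range' (i * i) ((n - i * i) / i + 1) i).foldl (fun tbl j => tbl.setIfInBounds j false) tbl

-- 'while i * i <= n: …; i += 2'  (fuel-bounded; fuel n+1 suffices); returns (i, table, pn)
def pvSieve (n : Nat) : Nat → Nat → Array Bool → List Nat → Nat × Array Bool × List Nat
  | 0, i, tbl, pn => (i, tbl, pn)
  | fuel + 1, i, tbl, pn =>
      if i * i ≤ n then
        if tbl.getD i false then
          pvSieve n fuel (i + 2) (pvClear n i tbl) (pn ++ [i])
        else pvSieve n fuel (i + 2) tbl pn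
      else (i, tbl, pn)

def pvEratosthenes (n : Nat) : List Nat :=
  let r := pvSieve n (n + 1) 3 (pvTable0 n) [2]
  r.2.2 ++ (List.range' r.1 (n + 1 - r.1)).filter (fun j => r.2.1.getD j false)

-- 'i = 0; while prime_numbers[i] <= N: i += 1' — i ends as the length of the longest
-- prefix of elements ≤ N (Python raises IndexError when the scan runs off the end;
-- those inputs are outside Pre_)
def pvScan (N : Int) (pn : List Int) : Int :=
  ((pn.takeWhile (fun p => decide (p ≤ N))).length : Int)

def calculate_matsuzaki_value (N : Int) (P : Int) : Int :=
  let pn : List Int := (pvEratosthenes 200000).map Int.ofNat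
  let i : Int := pvScan N pn
  let d : List Int :=
    (PySem.List.pyRange i (i + 30) 1).foldl (fun d j =>
      (PySem.List.pyRange j (i + 30) 1).foldl (fun d k =>
        d ++ [PySem.List.pyGetD pn j 0 + PySem.List.pyGetD pn k 0]) d) []
  let d := PySem.List.sorted d (fun x => x) false
  PySem.List.pyGetD d (P - 1) 0

-- ===== PORT B =====
-- 'while d * d <= c: if c % d == 0: is_p = False; break; d += 2'  (fuel c suffices)
def pvNoOddDiv (c : Nat) : Nat → Nat → Bool
  | 0, _ => true
  | fuel + 1, d => if d * d ≤ c then (if c % d == 0 then false else pvNoOddDiv c fuel (d + 2)) else true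

-- 'c = 3; while c <= limit: …; c += 2' — the candidates are the odd progression 3,5,…,≤ limit
def pvPrimesUpTo (limit : Nat) : List Nat :=
  ((List.range' 3 ((limit - 3) / 2 + 1) 2).foldl
    (fun acc c => if pvNoOddDiv c c 3 then c :: acc else acc) [2]).reverse

-- 'while t: x = t[0]; sums += [x + y for y in t]; t = t[1:]'
def pvPairSums : List Int → List Int
  | [] => []
  | x :: xs => (x :: xs).map (fun y => x + y) ++ pvPairSums xs

def calculate_matsuzaki_value_alt (N : Int) (P : Int) : Int :=
  let primes : List Int := (pvPrimesUpTo 200000).map Int.ofNat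
  let i : Int := primes.foldl (fun acc p => if p ≤ N then acc + 1 else acc) 0
  let w : List Int := PySem.List.slice primes (some i) (some (i + 30))
  let sums := PySem.List.sorted (pvPairSums w) (fun x => x) false
  PySem.List.pyGetD sums (P - 1) 0

-- ===== PRECONDITION & SPEC =====
-- Pre_ excludes exactly the inputs on which A raises IndexError: N ≥ 199669 (fewer than
-- 30 primes ≤ 200000 remain above N, so the window indexing runs out) and P outside
-- [-464, 465] (d has 465 sums; Python indexes d[P-1], negatives from the end).
def Pre_calculate_matsuzaki_value (N : Int) (P : Int) : Prop :=
  N < 199669 ∧ -464 ≤ P ∧ P ≤ 465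
instance (N : Int) (P : Int) : Decidable (Pre_calculate_matsuzaki_value N P) := by
  unfold Pre_calculate_matsuzaki_value; infer_instance

def pvWitness_calculate_matsuzaki_value : Int × Int := (100, 1)

def Spec_calculate_matsuzaki_value (N : Int) (P : Int) (out : Int) : Prop := out = calculate_matsuzaki_value_alt N P
instance (N : Int) (P : Int) (out : Int) : Decidable (Spec_calculate_matsuzaki_value N P out) := by unfold Spec_calculate_matsuzaki_value; infer_instance

-- ===== CLAIM (what is proved, stated in full; the proofs are below) =====
def Claim_equal_calculate_matsuzaki_value : Prop := ∀ (N : Int) (P : Int), Dom_calculate_matsuzaki_value N P → Pre_calculate_matsuzaki_value N P → Spec_calculate_matsuzaki_value N P (calculate_matsuzaki_value N P)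

-- ===== LEMMAS AND PROOFS =====

-- the canonical target of both prime generators
def primesBetween (a b : Nat) : List Nat :=
  (List.range' a (b - a)).filter (fun k => decide (Nat.Prime k))

-- meaning of a table entry k after the outer sieve loop has processed all odd i' < i
def sievePred (i k : Nat) : Prop :=
  k = 2 ∨ (3 ≤ k ∧ k % 2 = 1 ∧ ∀ p, Nat.Prime p → p < i → p * p ≤ k → ¬ p ∣ k)

def SieveInv (n i : Nat) (tbl : Array Bool) (pn : List Nat) : Prop :=
  3 ≤ i ∧ i % 2 = 1 ∧ (i = 3 ∨ (i - 2) * (i - 2) ≤ n) ∧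
  tbl.toList.length = n + 1 ∧
  pn = 2 :: primesBetween 3 i ∧
  (∀ k, k ≤ n → (tbl.toList.getD k false = true ↔ sievePred i k))

theorem arr_getD (a : Array Bool) (k : Nat) : a.getD k false = a.toList.getD k false := by
  simp [Array.getD_eq_getD_getElem?, List.getD_eq_getElem?_getD]

theorem table0_len (n : Nat) (hn : 2 ≤ n) : (pvTable0 n).toList.length = n + 1 := by
  simp [pvTable0]; omega

theorem table0_getD (n k : Nat) (hn : 2 ≤ n) (hk : k ≤ n) :
    ((pvTable0 n).toList.getD k false = true) ↔ (k = 2 ∨ (3 ≤ k ∧ k % 2 = 1)) := by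
  simp only [pvTable0, List.toList_toArray]
  match k, hk with
  | 0, _ => simp [List.getD_eq_getElem?_getD]
  | 1, _ => simp [List.getD_eq_getElem?_getD]
  | 2, _ => simp [List.getD_eq_getElem?_getD]
  | (m+3), hk =>
    rw [List.getD_eq_getElem?_getD]
    rw [List.getElem?_append_right (by simp)]
    simp only [List.length_cons, List.length_nil]
    rw [List.getElem?_map]
    have hm : m < n - 2 := by omega
    simp [hm]
    omega

theorem foldl_set_toList (l : List Nat) (tbl : Array Bool) :
    (l.foldl (fun t j => t.setIfInBounds j false) tbl).toList
      = l.foldl (fun t j => t.set j false) tbl.toList := by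
  induction l generalizing tbl with
  | nil => rfl
  | cons j l ih => simp [List.foldl_cons, ih, Array.toList_setIfInBounds]

theorem foldl_set_len (l : List Nat) (t : List Bool) :
    (l.foldl (fun t j => t.set j false) t).length = t.length := by
  induction l generalizing t with
  | nil => rfl
  | cons j l ih => simp [List.foldl_cons, ih]

theorem foldl_set_getD (l : List Nat) (t : List Bool) (k : Nat) :
    (l.foldl (fun t j => t.set j false) t).getD k false
      = if k ∈ l ∧ k < t.length then false else t.getD k false := by
  induction l generalizing t with
  | nil => simp
  | cons j l ih =>
    simp only [List.foldl_cons, ih, List.length_set, List.mem_cons]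
    rw [List.getD_eq_getElem?_getD, List.getElem?_set, List.getD_eq_getElem?_getD]
    by_cases hjk : j = k <;> by_cases hkl : k ∈ l <;> by_cases hlen : k < t.length <;>
      simp [hjk, hkl, hlen]
    · intro h; omega

theorem range'_prog (n i k : Nat) (hi : 1 ≤ i) (hk : k ≤ n) :
    (k ∈ List.range' (i * i) ((n - i * i) / i + 1) i) ↔ (i ∣ k ∧ i * i ≤ k) := by
  rw [List.mem_range']
  constructor
  · rintro ⟨m, hm, rfl⟩
    exact ⟨⟨i + m, by ring⟩, Nat.le_add_right _ _⟩
  · rintro ⟨⟨c, rfl⟩, hik⟩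
    have hci : i ≤ c := by
      by_contra h
      have : i * c < i * i := by
        have := Nat.mul_lt_mul_left (show 0 < i by omega) |>.mpr (show c < i by omega); omega
      omega
    refine ⟨c - i, ?_, by rw [Nat.mul_sub]; omega⟩
    have h1 : c - i ≤ (n - i * i) / i := by
      rw [Nat.le_div_iff_mul_le (by omega)]
      have : (c - i) * i = i * c - i * i := by rw [Nat.sub_mul]; ring_nf
      omega
    omega

theorem clear_len (n i : Nat) (tbl : Array Bool) :
    (pvClear n i tbl).toList.length = tbl.toList.length := by
  rw [pvClear, foldl_set_toList, foldl_set_len]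

theorem clear_getD (n i : Nat) (tbl : Array Bool) (hi : 1 ≤ i)
    (hlen : tbl.toList.length = n + 1) (k : Nat) (hk : k ≤ n) :
    ((pvClear n i tbl).toList.getD k false = true) ↔
      (tbl.toList.getD k false = true ∧ ¬ (i ∣ k ∧ i * i ≤ k)) := by
  rw [pvClear, foldl_set_toList, foldl_set_getD]
  have hkl : k < tbl.toList.length := by omega
  by_cases h : i ∣ k ∧ i * i ≤ k
  · rw [if_pos ⟨(range'_prog n i k hi hk).mpr h, hkl⟩]; simp [h]
  · rw [if_neg (by rw [range'_prog n i k hi hk]; tauto)]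
    simp [h]

theorem not_prime_even (m : Nat) (he : m % 2 = 0) (hne : m ≠ 2) : ¬ Nat.Prime m := by
  intro hp
  exact hne ((Nat.Prime.even_iff hp).mp (Nat.even_iff.mpr he))

theorem minFac_lt_of_comp (k : Nat) (h3 : 3 ≤ k) (hp : ¬ Nat.Prime k) :
    Nat.Prime k.minFac ∧ k.minFac ∣ k ∧ k.minFac * k.minFac ≤ k ∧ k.minFac < k := by
  have hne : k ≠ 1 := by omega
  have hprime := Nat.minFac_prime hne
  have hdvd := Nat.minFac_dvd k
  have hsq : k.minFac * k.minFac ≤ k := by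
    have := Nat.minFac_sq_le_self (by omega) hp
    simpa [Nat.pow_two] using this
  refine ⟨hprime, hdvd, hsq, ?_⟩
  rcases Nat.lt_or_ge k.minFac k with h | h
  · exact h
  · exfalso
    have hle : k.minFac ≤ k := Nat.le_of_dvd (by omega) hdvd
    have : k.minFac = k := le_antisymm hle h
    nlinarith

theorem sievePred_self (i : Nat) (h3 : 3 ≤ i) (hodd : i % 2 = 1) :
    sievePred i i ↔ Nat.Prime i := by
  unfold sievePred
  constructor
  · rintro (h2 | ⟨-, -, h⟩)
    · omega
    · by_contra hp
      obtain ⟨hq, hd, hsq, hlt⟩ := minFac_lt_of_comp i h3 hp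
      exact h _ hq hlt hsq hd
  · intro hp
    refine Or.inr ⟨h3, hodd, fun p pp hlt hsq hd => ?_⟩
    rcases (Nat.Prime.eq_one_or_self_of_dvd hp p hd) with h | h
    · exact pp.one_lt.ne' h
    · omega

theorem sievePred_step_prime (i k : Nat) (h3 : 3 ≤ i) (hodd : i % 2 = 1) (hp : Nat.Prime i) :
    (sievePred (i + 2) k) ↔ (sievePred i k ∧ ¬ (i ∣ k ∧ i * i ≤ k)) := by
  unfold sievePred
  constructor
  · rintro (h2 | ⟨hk3, hk2, h⟩)
    · subst h2
      refine ⟨Or.inl rfl, ?_⟩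
      rintro ⟨-, hsq⟩; nlinarith
    · refine ⟨Or.inr ⟨hk3, hk2, fun p pp hlt hsq hd => h p pp (by omega) hsq hd⟩, ?_⟩
      rintro ⟨hd, hsq⟩
      exact h i hp (by omega) hsq hd
  · rintro ⟨h2 | ⟨hk3, hk2, h⟩, hni⟩
    · exact Or.inl h2
    · refine Or.inr ⟨hk3, hk2, fun p pp hlt hsq hd => ?_⟩
      rcases Nat.lt_or_ge p i with hpi | hpi
      · exact h p pp hpi hsq hd
      · have : p = i ∨ p = i + 1 := by omega
        rcases this with rfl | rfl
        · exact hni ⟨hd, hsq⟩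
        · exact not_prime_even _ (by omega) (by omega) pp

theorem sievePred_step_comp (i k : Nat) (h3 : 3 ≤ i) (hodd : i % 2 = 1) (hp : ¬ Nat.Prime i) :
    (sievePred (i + 2) k) ↔ sievePred i k := by
  unfold sievePred
  constructor
  · rintro (h2 | ⟨hk3, hk2, h⟩)
    · exact Or.inl h2
    · exact Or.inr ⟨hk3, hk2, fun p pp hlt hsq hd => h p pp (by omega) hsq hd⟩
  · rintro (h2 | ⟨hk3, hk2, h⟩)
    · exact Or.inl h2
    · refine Or.inr ⟨hk3, hk2, fun p pp hlt hsq hd => ?_⟩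
      rcases Nat.lt_or_ge p i with hpi | hpi
      · exact h p pp hpi hsq hd
      · have : p = i ∨ p = i + 1 := by omega
        rcases this with rfl | rfl
        · exact hp pp
        · exact not_prime_even _ (by omega) (by omega) pp

theorem sievePred_final (i_f j n : Nat) (h3 : 3 ≤ i_f) (hb : n < i_f * i_f)
    (hj3 : 3 ≤ j) (hjn : j ≤ n) : (sievePred i_f j ↔ Nat.Prime j) := by
  unfold sievePred
  constructor
  · rintro (h2 | ⟨-, hodd, h⟩)
    · omega
    · by_contra hp
      obtain ⟨hq, hd, hsq, hlt⟩ := minFac_lt_of_comp j hj3 hp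
      have hlti : j.minFac < i_f := by nlinarith
      exact h _ hq hlti hsq hd
  · intro hp
    refine Or.inr ⟨hj3, ?_, fun p pp hlt hsq hd => ?_⟩
    · rcases Nat.Prime.eq_two_or_odd hp with h | h
      · omega
      · exact h
    · rcases (Nat.Prime.eq_one_or_self_of_dvd hp p hd) with h | h
      · exact pp.one_lt.ne' h
      · subst h; nlinarith

theorem primesBetween_step (i : Nat) (h3 : 3 ≤ i) (hodd : i % 2 = 1) :
    primesBetween 3 (i + 2) =
      primesBetween 3 i ++ (if Nat.Prime i then [i] else []) := by
  unfold primesBetween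
  have h1 : i + 2 - 3 = (i - 3) + 1 + 1 := by omega
  rw [h1, List.range'_concat, List.range'_concat]
  have h2 : 3 + 1 * (i - 3) = i := by omega
  have h3' : 3 + 1 * (i - 3 + 1) = i + 1 := by omega
  rw [h2, h3']
  rw [List.filter_append, List.filter_append]
  have hnp : ¬ Nat.Prime (i + 1) := not_prime_even _ (by omega) (by omega)
  have h4 : i - 3 = i - 3 := rfl
  simp only [List.filter_cons, List.filter_nil]
  by_cases hp : Nat.Prime i <;> simp [hp, hnp]

theorem sieve_inv (n : Nat) (fuel i : Nat) (tbl : Array Bool) (pn : List Nat)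
    (hinv : SieveInv n i tbl pn) (hfuel : n < (i + 2 * fuel) * (i + 2 * fuel)) :
    SieveInv n (pvSieve n fuel i tbl pn).1 (pvSieve n fuel i tbl pn).2.1
        (pvSieve n fuel i tbl pn).2.2 ∧
      n < (pvSieve n fuel i tbl pn).1 * (pvSieve n fuel i tbl pn).1 := by
  induction fuel generalizing i tbl pn with
  | zero =>
    rw [pvSieve]
    exact ⟨hinv, by simpa using hfuel⟩
  | succ fuel ih =>
    obtain ⟨h3, hodd, hstart, hlen, hpn, htbl⟩ := hinv
    rw [pvSieve]
    by_cases hii : i * i ≤ n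
    · rw [if_pos hii]
      have hin : i ≤ n := le_trans (Nat.le_mul_of_pos_left i (by omega)) hii
      have hb : tbl.getD i false = true ↔ Nat.Prime i := by
        rw [arr_getD, htbl i hin, sievePred_self i h3 hodd]
      have hfuel' : n < ((i + 2) + 2 * fuel) * ((i + 2) + 2 * fuel) := by
        have e : (i + 2) + 2 * fuel = i + 2 * (fuel + 1) := by ring
        rw [e]; exact hfuel
      by_cases hp : Nat.Prime i
      · rw [if_pos (hb.mpr hp)]
        refine ih (i + 2) _ _ ⟨by omega, by omega, Or.inr (by simpa using hii), ?_, ?_, ?_⟩ hfuel'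
        · rw [clear_len]; exact hlen
        · rw [hpn, primesBetween_step i h3 hodd, if_pos hp]; simp
        · intro k hk
          rw [clear_getD n i tbl (by omega) hlen k hk, htbl k hk,
            sievePred_step_prime i k h3 hodd hp]
      · rw [if_neg (by rw [hb]; exact hp)]
        refine ih (i + 2) _ _ ⟨by omega, by omega, Or.inr (by simpa using hii), hlen, ?_, ?_⟩ hfuel'
        · rw [hpn, primesBetween_step i h3 hodd, if_neg hp]; simp
        · intro k hk
          rw [htbl k hk, sievePred_step_comp i k h3 hodd hp]
    · rw [if_neg hii]
      exact ⟨⟨h3, hodd, hstart, hlen, hpn, htbl⟩, show n < i * i by omega⟩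

theorem nodup_subset_length (l1 l2 : List Int) (h : l1.Nodup) (hs : l1 ⊆ l2) :
    l1.length ≤ l2.length := by
  have h1 : l1.toFinset.card = l1.length := List.toFinset_card_of_nodup h
  have h2 : l1.toFinset ⊆ l2.toFinset := by
    intro x hx; rw [List.mem_toFinset] at *; exact hs hx
  have h3 := Finset.card_le_card h2
  have h4 : l2.toFinset.card ≤ l2.length := l2.toFinset_card_le
  omega

theorem primesBetween_append (a b c : Nat) (h1 : a ≤ b) (h2 : b ≤ c) :
    primesBetween a b ++ primesBetween b c = primesBetween a c := by
  unfold primesBetween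
  rw [← List.filter_append]
  congr 1
  have e1 : b = a + 1 * (b - a) := by omega
  rw [show List.range' b (c - b) = List.range' (a + 1 * (b - a)) (c - b) by rw [← e1]]
  rw [List.range'_append]
  congr 1
  omega

theorem eratosthenes_spec (n : Nat) (hn : 4 ≤ n) :
    pvEratosthenes n = 2 :: primesBetween 3 (n + 1) := by
  have hinv0 : SieveInv n 3 (pvTable0 n) [2] := by
    refine ⟨le_refl 3, rfl, Or.inl rfl, table0_len n (by omega), by simp [primesBetween], ?_⟩
    intro k hk
    rw [table0_getD n k (by omega) hk]
    unfold sievePred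
    constructor
    · rintro (h2 | ⟨hk3, hodd⟩)
      · exact Or.inl h2
      · refine Or.inr ⟨hk3, hodd, fun p pp hlt hsq hd => ?_⟩
        have hp2 : p = 2 := by have := pp.two_le; omega
        subst hp2
        omega
    · rintro (h2 | ⟨hk3, hodd, -⟩)
      · exact Or.inl h2
      · exact Or.inr ⟨hk3, hodd⟩
  have hfuel : n < (3 + 2 * (n + 1)) * (3 + 2 * (n + 1)) := by nlinarith
  obtain ⟨⟨h3, hodd, hstart, hlen, hpn, htbl⟩, hbig⟩ :=
    sieve_inv n (n + 1) 3 (pvTable0 n) [2] hinv0 hfuel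
  set r := pvSieve n (n + 1) 3 (pvTable0 n) [2] with hr
  have hif : r.1 ≤ n + 1 := by
    rcases hstart with h | h
    · omega
    · rcases Nat.lt_or_ge (r.1 - 2) 2 with hc | hc
      · omega
      · have : (r.1 - 2) + 2 ≤ (r.1 - 2) * (r.1 - 2) := by nlinarith
        omega
  have hfilter : (List.range' r.1 (n + 1 - r.1)).filter (fun j => r.2.1.getD j false)
      = primesBetween r.1 (n + 1) := by
    unfold primesBetween
    apply List.filter_congr
    intro j hj
    rw [List.mem_range'_1] at hj
    have hj3 : 3 ≤ j := by omega
    have hjn : j ≤ n := by omega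
    have hiff := htbl j hjn
    rw [arr_getD]
    by_cases hP : Nat.Prime j
    · simp only [hP, decide_true]
      rw [hiff, sievePred_final r.1 j n h3 hbig hj3 hjn]
      simpa using hP
    · simp only [hP, decide_false]
      rw [← Bool.not_eq_true, hiff, sievePred_final r.1 j n h3 hbig hj3 hjn]
      simpa using hP
  rw [pvEratosthenes]
  show r.2.2 ++ _ = _
  rw [hfilter, hpn]
  show (2 :: primesBetween 3 r.1) ++ primesBetween r.1 (n + 1) = _
  rw [List.cons_append, primesBetween_append 3 r.1 (n + 1) h3 hif]

theorem noOddDiv_spec (c : Nat) (fuel d : Nat) (hd : 3 ≤ d) (hodd : d % 2 = 1)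
    (hfuel : c < (d + 2 * fuel) * (d + 2 * fuel)) :
    (pvNoOddDiv c fuel d = true ↔ ∀ e, d ≤ e → e % 2 = 1 → e * e ≤ c → ¬ e ∣ c) := by
  induction fuel generalizing d with
  | zero =>
    rw [pvNoOddDiv]
    simp only [true_iff]
    intro e hde _ hsq _
    have : d * d ≤ e * e := Nat.mul_le_mul hde hde
    simp at hfuel
    omega
  | succ fuel ih =>
    rw [pvNoOddDiv]
    by_cases hdd : d * d ≤ c
    · rw [if_pos hdd]
      by_cases hmod : c % d = 0
      · simp only [hmod, beq_self_eq_true, if_true]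
        constructor
        · intro h; exact absurd h (by simp)
        · intro hall
          exact absurd (hall d (le_refl d) hodd hdd (Nat.dvd_of_mod_eq_zero hmod)) (by simp)
      · rw [if_neg (by simpa using hmod)]
        have hfuel' : c < ((d + 2) + 2 * fuel) * ((d + 2) + 2 * fuel) := by
          have e : (d + 2) + 2 * fuel = d + 2 * (fuel + 1) := by ring
          rw [e]; exact hfuel
        rw [ih (d + 2) (by omega) (by omega) hfuel']
        constructor
        · intro h e hde he hsq hdvd
          rcases Nat.lt_or_ge e (d + 2) with hlt | hge
          · have : e = d ∨ e = d + 1 := by omega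
            rcases this with rfl | rfl
            · exact hmod (Nat.eq_zero_of_dvd_of_lt hdvd |> fun _ => Nat.mod_eq_zero_of_dvd hdvd)
            · omega
          · exact h e hge he hsq hdvd
        · intro h e hde he hsq hdvd
          exact h e (by omega) he hsq hdvd
    · rw [if_neg hdd]
      simp only [true_iff]
      intro e hde _ hsq
      have : d * d ≤ e * e := Nat.mul_le_mul hde hde
      omega

theorem noOddDiv_prime (c : Nat) (h3 : 3 ≤ c) (hodd : c % 2 = 1) :
    (pvNoOddDiv c c 3 = true ↔ Nat.Prime c) := by
  rw [noOddDiv_spec c c 3 (le_refl 3) rfl (by nlinarith)]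
  constructor
  · intro h
    by_contra hp
    obtain ⟨hq, hd, hsq, hlt⟩ := minFac_lt_of_comp c h3 hp
    have hodd' : c.minFac % 2 = 1 := by
      rcases Nat.Prime.eq_two_or_odd hq with h2 | h2
      · exfalso
        rw [h2] at hd
        omega
      · exact h2
    have h3' : 3 ≤ c.minFac := by
      have := hq.two_le
      omega
    exact h c.minFac h3' hodd' hsq hd
  · intro hp e h3e he hsq hdvd
    rcases (Nat.Prime.eq_one_or_self_of_dvd hp e hdvd) with h | h
    · omega
    · subst h; nlinarith

theorem trial_fold (m s : Nat) (acc : List Nat) (hs : 3 ≤ s) (hodd : s % 2 = 1) :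
    (List.range' s m 2).foldl (fun acc c => if pvNoOddDiv c c 3 then c :: acc else acc) acc
      = ((List.range' s m 2).filter (fun c => decide (Nat.Prime c))).reverse ++ acc := by
  induction m generalizing s acc with
  | zero => simp
  | succ m ih =>
    rw [List.range'_succ, List.foldl_cons, List.filter_cons]
    by_cases hp : Nat.Prime s
    · rw [if_pos ((noOddDiv_prime s hs hodd).mpr hp)]
      rw [ih (s + 2) (s :: acc) (by omega) (by omega)]
      simp [hp]
    · rw [if_neg (by
        intro hT
        exact hp ((noOddDiv_prime s hs hodd).mp hT))]
      rw [ih (s + 2) acc (by omega) (by omega)]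
      simp [hp]

theorem odd_filter (m s : Nat) (hs : 3 ≤ s) (hodd : s % 2 = 1) :
    (List.range' s (2 * m) 1).filter (fun c => decide (Nat.Prime c))
      = (List.range' s m 2).filter (fun c => decide (Nat.Prime c)) := by
  induction m generalizing s with
  | zero => simp
  | succ m ih =>
    have e1 : 2 * (m + 1) = (2 * m) + 1 + 1 := by ring
    rw [e1, List.range'_succ, List.range'_succ, List.range'_succ]
    rw [List.filter_cons, List.filter_cons, List.filter_cons]
    have hnp : ¬ Nat.Prime (s + 1) := not_prime_even _ (by omega) (by omega)
    have e2 : s + 1 + 1 = s + 2 := by omega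
    rw [e2, ih (s + 2) (by omega) (by omega)]
    simp [hnp]

theorem primesUpTo_spec : pvPrimesUpTo 200000 = 2 :: primesBetween 3 200001 := by
  rw [pvPrimesUpTo]
  have e1 : (200000 - 3) / 2 + 1 = 99999 := by norm_num
  rw [e1, trial_fold 99999 3 [2] (le_refl 3) rfl]
  rw [List.reverse_append, List.reverse_reverse]
  unfold primesBetween
  rw [show (200001 - 3) = 2 * 99999 by norm_num, odd_filter 99999 3 (le_refl 3) rfl]
  rfl

-- the shared prime list, in Int form
theorem PL_pairwise_lt :
    ((2 :: primesBetween 3 200001).map Int.ofNat).Pairwise (· < ·) := by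
  rw [List.pairwise_map, List.pairwise_cons]
  refine ⟨?_, ?_⟩
  · intro x hx
    have := List.mem_range'_1.mp (List.mem_of_mem_filter hx)
    exact Int.ofNat_lt.mpr (by omega)
  · exact (List.Pairwise.filter _ (List.pairwise_lt_range' 1)).imp
      (fun h => Int.ofNat_lt.mpr h)

theorem takeWhile_eq_countP (N : Int) (l : List Int) (h : l.Pairwise (· ≤ ·)) :
    (l.takeWhile (fun p => decide (p ≤ N))).length = l.countP (fun p => decide (p ≤ N)) := by
  induction l with
  | nil => rfl
  | cons p l ih =>
    rw [List.pairwise_cons] at h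
    obtain ⟨h1, h2⟩ := h
    by_cases hp : p ≤ N
    · simp [hp, ih h2]
    · have hz : l.countP (fun q => decide (q ≤ N)) = 0 := by
        rw [List.countP_eq_zero]
        intro q hq
        simp only [decide_eq_true_eq]
        have := h1 q hq
        omega
      simp [hp, hz]

theorem mem_PL (q : Nat) (hq : Nat.Prime q) (h3 : 3 ≤ q) (hb : q < 200001) :
    (q : Int) ∈ (2 :: primesBetween 3 200001).map Int.ofNat := by
  rw [List.mem_map]
  refine ⟨q, ?_, rfl⟩
  rw [List.mem_cons]
  right
  unfold primesBetween
  rw [List.mem_filter, List.mem_range'_1]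
  refine ⟨⟨h3, by omega⟩, by simpa using hq⟩

def topPrimes : List Int :=
  [199669, 199673, 199679, 199687, 199697, 199721, 199729, 199739, 199741, 199751,
   199753, 199777, 199783, 199799, 199807, 199811, 199813, 199819, 199831, 199853,
   199873, 199877, 199889, 199909, 199921, 199931, 199933, 199961, 199967, 199999]

theorem count_window (N : Int) (hN : N < 199669) :
    ((2 :: primesBetween 3 200001).map Int.ofNat).countP (fun p => decide (p ≤ N)) + 30
      ≤ ((2 :: primesBetween 3 200001).map Int.ofNat).length := by
  set L := (2 :: primesBetween 3 200001).map Int.ofNat with hL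
  have hsplit := List.length_eq_countP_add_countP (fun p : Int => decide (p ≤ N)) (l := L)
  have hsub : topPrimes ⊆ L.filter (fun a => decide ¬(decide (a ≤ N) = true)) := by
    intro t ht
    rw [List.mem_filter]
    have hmem : t ∈ L := by
      fin_cases ht <;>
        exact mem_PL _ (by norm_num) (by norm_num) (by norm_num)
    refine ⟨hmem, ?_⟩
    have h169 : (199669 : Int) ≤ t := by fin_cases ht <;> norm_num
    simp only [decide_eq_true_eq]
    omega
  have hnd : topPrimes.Nodup := by decide
  have hlen := nodup_subset_length topPrimes _ hnd hsub
  have h30 : topPrimes.length = 30 := by rfl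
  have heq : L.countP (fun a => decide ¬(decide (a ≤ N) = true))
      = (L.filter (fun a => decide ¬(decide (a ≤ N) = true))).length := by
    rw [List.countP_eq_length_filter]
  omega

theorem map_pyGetD_window (t a : Nat) (l : List Int) (h : a + t ≤ l.length) :
    (PySem.List.pyRange (a : Int) ((a : Int) + (t : Int)) 1).map (fun k => PySem.List.pyGetD l k 0)
      = (l.drop a).take t := by
  induction t generalizing a with
  | zero =>
    rw [PySem.List.pyRange_one_eq_nil (by omega)]
    simp
  | succ t ih =>
    rw [PySem.List.pyRange_one_cons (by omega)]
    rw [List.map_cons]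
    have ha : a < l.length := by omega
    rw [List.drop_eq_getElem_cons ha, List.take_succ_cons]
    congr 1
    · rw [PySem.List.pyGetD_natCast, List.getD_eq_getElem?_getD]
      simp [ha]
    · have e1 : (a : Int) + 1 = ((a + 1 : Nat) : Int) := by push_cast; ring
      have e2 : (a : Int) + ((t + 1 : Nat) : Int) = ((a + 1 : Nat) : Int) + (t : Nat) := by
        push_cast; ring
      rw [e1, e2, ih (a + 1) (by omega)]

theorem window_sums (m i : Nat) (l : List Int) (h : i + m ≤ l.length) :
    (PySem.List.pyRange (i : Int) ((i : Int) + (m : Int)) 1).flatMap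
      (fun j => (PySem.List.pyRange j ((i : Int) + (m : Int)) 1).map
        (fun k => PySem.List.pyGetD l j 0 + PySem.List.pyGetD l k 0))
      = pvPairSums ((l.drop i).take m) := by
  induction m generalizing i with
  | zero =>
    rw [PySem.List.pyRange_one_eq_nil (by omega)]
    simp [pvPairSums]
  | succ m ih =>
    rw [PySem.List.pyRange_one_cons (by omega), List.flatMap_cons]
    have hi : i < l.length := by omega
    rw [List.drop_eq_getElem_cons hi, List.take_succ_cons, pvPairSums]
    have hhead : (PySem.List.pyRange (i : Int) ((i : Int) + ((m + 1 : Nat) : Int)) 1).map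
        (fun k => PySem.List.pyGetD l (i : Int) 0 + PySem.List.pyGetD l k 0)
        = (l[i] :: (l.drop (i + 1)).take m).map (fun y => l[i] + y) := by
      have hx : PySem.List.pyGetD l (i : Int) 0 = l[i] := by
        rw [PySem.List.pyGetD_natCast, List.getD_eq_getElem?_getD]
        simp [hi]
      calc (PySem.List.pyRange (i : Int) ((i : Int) + ((m + 1 : Nat) : Int)) 1).map
            (fun k => PySem.List.pyGetD l (i : Int) 0 + PySem.List.pyGetD l k 0)
          = ((PySem.List.pyRange (i : Int) ((i : Int) + ((m + 1 : Nat) : Int)) 1).map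
            (fun k => PySem.List.pyGetD l k 0)).map (fun y => l[i] + y) := by
            rw [List.map_map]; simp [hx, Function.comp]
        _ = ((l.drop i).take (m + 1)).map (fun y => l[i] + y) := by
            rw [map_pyGetD_window (m + 1) i l h]
        _ = (l[i] :: (l.drop (i + 1)).take m).map (fun y => l[i] + y) := by
            rw [List.drop_eq_getElem_cons hi, List.take_succ_cons]
    rw [hhead]
    congr 1
    have e1 : (i : Int) + 1 = ((i + 1 : Nat) : Int) := by push_cast; ring
    have e2 : (i : Int) + ((m + 1 : Nat) : Int) = ((i + 1 : Nat) : Int) + (m : Nat) := by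
      push_cast; ring
    rw [e1, e2, ih (i + 1) (by omega)]
-- ===== VERDICT (by name: the statement is the Claim_ definition above) =====
theorem calculate_matsuzaki_value_spec : Claim_equal_calculate_matsuzaki_value := by
  intro N P hdom hpre
  obtain ⟨hN, hP1, hP2⟩ := hpre
  unfold Spec_calculate_matsuzaki_value
  simp only [calculate_matsuzaki_value, calculate_matsuzaki_value_alt, pvScan]
  have hA : (pvEratosthenes 200000).map Int.ofNat
      = (2 :: primesBetween 3 200001).map Int.ofNat := by
    rw [eratosthenes_spec 200000 (by norm_num)]
  have hB : (pvPrimesUpTo 200000).map Int.ofNat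
      = (2 :: primesBetween 3 200001).map Int.ofNat := by
    rw [primesUpTo_spec]
  rw [hA, hB]
  set C := (2 :: primesBetween 3 200001).map Int.ofNat with hC
  have hle : C.Pairwise (· ≤ ·) := PL_pairwise_lt.imp (fun h => le_of_lt h)
  rw [takeWhile_eq_countP N C hle]
  rw [PySem.List.foldl_ite_add_one (fun p => p ≤ N) C 0]
  set c := C.countP (fun p => decide (p ≤ N)) with hc
  have hwin : c + 30 ≤ C.length := count_window N hN
  have hslice := PySem.List.slice_natCast_add C c 30
  simp only [Nat.cast_ofNat] at hslice
  rw [zero_add, hslice]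
  simp only [PySem.List.foldl_append_singleton_eq_map]
  rw [PySem.List.foldl_append_eq_flatMap]
  rw [List.nil_append]
  have hw := window_sums 30 c C hwin
  simp only [Nat.cast_ofNat] at hw
  rw [hw]
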